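-- pv_equiv track=rewrite | github.com/miris032/Bachelor_thesis-master | src/eva_test.py | reduce_FP
-- ===== SOURCE A (Python) =====
-- def is_in_synthetic_drift_areas(point, synthetic_drift_areas):
--     for area in synthetic_drift_areas:
--         if area[0] <= point <= area[1]:
--             return True
--     return False
--
-- def reduce_FP(located_points_without_synthetic_drifts, located_points, actual_points, interval, l):
--
--     synthetic_drift_areas =[]
--     for synthetic_drift in actual_points:
--         synthetic_drift_areas.append((synthetic_drift, synthetic_drift + interval))
--
--     located_points_new = []
--     for point in located_points:
--
--         if (not any(abs(point - value) <= l for value in located_points_without_synthetic_drifts)) \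
--                 or is_in_synthetic_drift_areas(point, synthetic_drift_areas):
--             located_points_new.append(point)
--     return located_points_new
-- ===== SOURCE B (Python) =====
-- def reduce_FP(located_points_without_synthetic_drifts, located_points, actual_points, interval, l):
--     sorted_values = sorted(located_points_without_synthetic_drifts)
--     sorted_drifts = sorted(actual_points)
--
--     def has_in_range(xs, lo, hi):
--         # binary search on a sorted list: is there an element with lo <= x <= hi?
--         a, b = 0, len(xs)
--         while a < b:
--             mid = (a + b) // 2
--             if xs[mid] < lo:
--                 a = mid + 1
--             elif xs[mid] > hi:
--                 b = mid
--             else: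
--                 return True
--         return False
--
--     return [p for p in located_points
--             if not has_in_range(sorted_values, p - l, p + l)
--             or has_in_range(sorted_drifts, p - interval, p)]
-- ===== Notes on version B (the rewrite author's own statement) =====
-- stated objective: faster
-- what changed: B sorts the reference values and drift starts once and answers each point's proximity and drift-area tests with a binary range search instead of A's linear scans over values and areas per point.
import Mathlib
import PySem

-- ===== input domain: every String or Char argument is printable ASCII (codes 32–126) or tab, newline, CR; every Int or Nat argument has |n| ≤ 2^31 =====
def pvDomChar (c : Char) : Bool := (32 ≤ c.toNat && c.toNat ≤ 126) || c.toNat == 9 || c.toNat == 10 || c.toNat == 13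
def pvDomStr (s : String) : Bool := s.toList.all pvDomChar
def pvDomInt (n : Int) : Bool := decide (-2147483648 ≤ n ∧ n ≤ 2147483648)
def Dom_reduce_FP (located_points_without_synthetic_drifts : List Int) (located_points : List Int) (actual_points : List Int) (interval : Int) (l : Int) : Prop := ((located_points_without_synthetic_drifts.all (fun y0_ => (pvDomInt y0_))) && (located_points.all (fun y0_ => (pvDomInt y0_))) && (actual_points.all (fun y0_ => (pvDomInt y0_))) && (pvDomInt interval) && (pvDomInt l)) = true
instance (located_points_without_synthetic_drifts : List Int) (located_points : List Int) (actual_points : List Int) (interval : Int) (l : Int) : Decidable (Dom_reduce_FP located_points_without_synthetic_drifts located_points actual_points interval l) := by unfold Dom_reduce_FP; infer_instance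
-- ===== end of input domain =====

-- B: sort once, binary range-search per point, instead of A's per-point linear scans.
-- ===== PORT A =====
def is_in_synthetic_drift_areas (point : Int) (synthetic_drift_areas : List (Int × Int)) : Bool :=
  match synthetic_drift_areas with
  | [] => false
  | area :: rest =>
    if area.1 ≤ point ∧ point ≤ area.2 then true
    else is_in_synthetic_drift_areas point rest

def reduce_FP (located_points_without_synthetic_drifts : List Int) (located_points : List Int) (actual_points : List Int) (interval : Int) (l : Int) : List Int :=
  let synthetic_drift_areas :=
    actual_points.foldl (fun acc synthetic_drift => acc ++ [(synthetic_drift, synthetic_drift + interval)]) []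
  located_points.foldl (fun acc point =>
    if (!(located_points_without_synthetic_drifts.any (fun value => decide (|point - value| ≤ l))))
        || is_in_synthetic_drift_areas point synthetic_drift_areas
    then acc ++ [point] else acc) []

-- ===== PORT B =====
-- hand-written binary search of Source B, ported step for step (getD is exact: mid is always in range)
def hasInRangeAux (xs : List Int) (lo hi : Int) (a b : Nat) : Bool :=
  if _h : a < b then
    let mid := (a + b) / 2
    if xs.getD mid 0 < lo then hasInRangeAux xs lo hi (mid + 1) b
    else if hi < xs.getD mid 0 then hasInRangeAux xs lo hi a mid
    else true
  else false
termination_by b - a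
decreasing_by all_goals omega

def hasInRange (xs : List Int) (lo hi : Int) : Bool := hasInRangeAux xs lo hi 0 xs.length

def reduce_FP_alt (located_points_without_synthetic_drifts : List Int) (located_points : List Int) (actual_points : List Int) (interval : Int) (l : Int) : List Int :=
  let sorted_values := PySem.List.sorted located_points_without_synthetic_drifts (fun x => x) false
  let sorted_drifts := PySem.List.sorted actual_points (fun x => x) false
  located_points.filter (fun p =>
    !hasInRange sorted_values (p - l) (p + l) || hasInRange sorted_drifts (p - interval) p)

-- ===== PRECONDITION & SPEC =====
def Spec_reduce_FP (located_points_without_synthetic_drifts : List Int) (located_points : List Int) (actual_points : List Int) (interval : Int) (l : Int) (out : List Int) : Prop := out = reduce_FP_alt located_points_without_synthetic_drifts located_points actual_points interval l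
instance (located_points_without_synthetic_drifts : List Int) (located_points : List Int) (actual_points : List Int) (interval : Int) (l : Int) (out : List Int) : Decidable (Spec_reduce_FP located_points_without_synthetic_drifts located_points actual_points interval l out) := by unfold Spec_reduce_FP; infer_instance

-- ===== CLAIM (what is proved, stated in full; the proofs are below) =====
def Claim_equal_reduce_FP : Prop := ∀ (located_points_without_synthetic_drifts : List Int) (located_points : List Int) (actual_points : List Int) (interval : Int) (l : Int), Dom_reduce_FP located_points_without_synthetic_drifts located_points actual_points interval l → Spec_reduce_FP located_points_without_synthetic_drifts located_points actual_points interval l (reduce_FP located_points_without_synthetic_drifts located_points actual_points interval l)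

-- ===== LEMMAS AND PROOFS =====

lemma getD_mono (xs : List Int) (hs : xs.Pairwise (· ≤ ·)) (i j : Nat)
    (hij : i ≤ j) (hj : j < xs.length) : xs.getD i 0 ≤ xs.getD j 0 := by
  rcases Nat.lt_or_ge i j with h | h
  · rw [List.getD_eq_getElem _ _ (by omega), List.getD_eq_getElem _ _ hj]
    exact (List.pairwise_iff_getElem.mp hs) i j (by omega) hj h
  · have : i = j := by omega
    subst this; rfl

lemma aux_correct (xs : List Int) (lo hi : Int) (hs : xs.Pairwise (· ≤ ·)) :
    ∀ n a b, b - a ≤ n → b ≤ xs.length →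
      (hasInRangeAux xs lo hi a b = true ↔
        ∃ j, a ≤ j ∧ j < b ∧ lo ≤ xs.getD j 0 ∧ xs.getD j 0 ≤ hi) := by
  intro n
  induction n with
  | zero =>
    intro a b hn _
    rw [hasInRangeAux]
    simp only [dif_neg (by omega : ¬ a < b)]
    constructor
    · intro h; exact absurd h (by simp)
    · rintro ⟨j, h1, h2, _⟩; omega
  | succ n ih =>
    intro a b hn hb
    rw [hasInRangeAux]
    by_cases hab : a < b
    · simp only [dif_pos hab]
      have hmid : a ≤ (a + b) / 2 ∧ (a + b) / 2 < b := by omega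
      by_cases h1 : xs.getD ((a + b) / 2) 0 < lo
      · simp only [if_pos h1]
        rw [ih ((a + b) / 2 + 1) b (by omega) hb]
        constructor
        · rintro ⟨j, hj1, hj2, hj3, hj4⟩; exact ⟨j, by omega, hj2, hj3, hj4⟩
        · rintro ⟨j, hj1, hj2, hj3, hj4⟩
          refine ⟨j, ?_, hj2, hj3, hj4⟩
          by_contra hc
          have : xs.getD j 0 ≤ xs.getD ((a + b) / 2) 0 :=
            getD_mono xs hs j ((a + b) / 2) (by omega) (by omega)
          omega
      · by_cases h2 : hi < xs.getD ((a + b) / 2) 0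
        · simp only [if_neg h1, if_pos h2]
          rw [ih a ((a + b) / 2) (by omega) (by omega)]
          constructor
          · rintro ⟨j, hj1, hj2, hj3, hj4⟩; exact ⟨j, hj1, by omega, hj3, hj4⟩
          · rintro ⟨j, hj1, hj2, hj3, hj4⟩
            refine ⟨j, hj1, ?_, hj3, hj4⟩
            by_contra hc
            have : xs.getD ((a + b) / 2) 0 ≤ xs.getD j 0 :=
              getD_mono xs hs ((a + b) / 2) j (by omega) (by omega)
            omega
        · simp only [if_neg h1, if_neg h2]
          constructor
          · intro _; exact ⟨(a + b) / 2, hmid.1, hmid.2, by omega, by omega⟩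
          · intro _; trivial
    · simp only [dif_neg hab]
      constructor
      · intro h; exact absurd h (by simp)
      · rintro ⟨j, h1, h2, _⟩; omega

lemma hasInRange_correct (xs : List Int) (lo hi : Int) (hs : xs.Pairwise (· ≤ ·)) :
    hasInRange xs lo hi = true ↔ ∃ x ∈ xs, lo ≤ x ∧ x ≤ hi := by
  rw [hasInRange, aux_correct xs lo hi hs xs.length 0 xs.length (by omega) le_rfl]
  constructor
  · rintro ⟨j, _, hj, h3, h4⟩
    rw [List.getD_eq_getElem _ _ hj] at h3 h4
    exact ⟨xs[j], List.getElem_mem hj, h3, h4⟩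
  · rintro ⟨x, hx, h3, h4⟩
    obtain ⟨j, hj, rfl⟩ := List.mem_iff_getElem.mp hx
    exact ⟨j, by omega, hj, by rw [List.getD_eq_getElem _ _ hj]; exact ⟨h3, h4⟩⟩

lemma is_in_eq_any (point : Int) (areas : List (Int × Int)) :
    is_in_synthetic_drift_areas point areas =
      areas.any (fun a => decide (a.1 ≤ point ∧ point ≤ a.2)) := by
  induction areas with
  | nil => rfl
  | cons a rest ih =>
    rw [is_in_synthetic_drift_areas]
    by_cases h : a.1 ≤ point ∧ point ≤ a.2 <;> simp [h, ih]

lemma hasInRange_sorted (xs : List Int) (lo hi : Int) :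
    hasInRange (PySem.List.sorted xs (fun x => x) false) lo hi = true ↔
      ∃ x ∈ xs, lo ≤ x ∧ x ≤ hi := by
  rw [hasInRange_correct _ _ _ (PySem.List.sorted_pairwise xs (fun x => x))]
  constructor
  · rintro ⟨x, hx, h⟩; exact ⟨x, (PySem.List.mem_sorted _ _ _ _).mp hx, h⟩
  · rintro ⟨x, hx, h⟩; exact ⟨x, (PySem.List.mem_sorted _ _ _ _).mpr hx, h⟩

-- ===== VERDICT (by name: the statement is the Claim_ definition above) =====
theorem reduce_FP_spec : Claim_equal_reduce_FP := by
  intro lpwsd lp ap interval l _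
  unfold Spec_reduce_FP reduce_FP reduce_FP_alt
  have hv : ∀ p : Int, hasInRange (PySem.List.sorted lpwsd (fun x => x) false) (p - l) (p + l) =
      lpwsd.any (fun value => decide (|p - value| ≤ l)) := by
    intro p
    rw [Bool.eq_iff_iff, hasInRange_sorted, List.any_eq_true]
    constructor <;> rintro ⟨x, hx, h⟩
    · exact ⟨x, hx, by simp only [decide_eq_true_eq, abs_le]; omega⟩
    · simp only [decide_eq_true_eq, abs_le] at h; exact ⟨x, hx, by omega⟩
  have hd : ∀ p : Int, hasInRange (PySem.List.sorted ap (fun x => x) false) (p - interval) p =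
      is_in_synthetic_drift_areas p (List.map (fun x => (x, x + interval)) ap) := by
    intro p
    rw [Bool.eq_iff_iff, hasInRange_sorted, is_in_eq_any, List.any_eq_true]
    constructor
    · rintro ⟨d, hd', h1, h2⟩
      exact ⟨(d, d + interval), List.mem_map.mpr ⟨d, hd', rfl⟩, by simp; omega⟩
    · rintro ⟨pr, hpr, h⟩
      obtain ⟨d, hd', rfl⟩ := List.mem_map.mp hpr
      simp only [decide_eq_true_eq] at h
      exact ⟨d, hd', by omega, by omega⟩
  rw [PySem.List.foldl_append_if]
  simp only [List.nil_append, List.map_id']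
  apply List.filter_congr
  intro p _
  rw [PySem.List.foldl_append_singleton_eq_map, hv, hd]
  rw [List.nil_append]
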